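-- pv_equiv track=rewrite | github.com/orchlonn/csc110 | exams/team_quiz_3.py | messString
-- ===== SOURCE A (Python) =====
-- def messString(String):
--     letters = 'pPiImM'
--     newStr = ''
--     for i in String:
--         if i in letters:
--             newStr += i + '1'
--         else:
--             newStr += i
--     return newStr
-- ===== SOURCE B (Python) =====
-- import re
--
-- def messString(String):
--     return re.sub(r'[pPiImM]', lambda m: m.group(0) + '1', String)
-- ===== Notes on version B (the rewrite author's own statement) =====
-- stated objective: idiomatic
-- what changed: Replaced the explicit per-character loop with quadratic string concatenation by a single re.sub over the character class [pPiImM] with a callback appending a '1' (ported as one flatMap over the characters instead of a fold with a string accumulator).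
import Mathlib
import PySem

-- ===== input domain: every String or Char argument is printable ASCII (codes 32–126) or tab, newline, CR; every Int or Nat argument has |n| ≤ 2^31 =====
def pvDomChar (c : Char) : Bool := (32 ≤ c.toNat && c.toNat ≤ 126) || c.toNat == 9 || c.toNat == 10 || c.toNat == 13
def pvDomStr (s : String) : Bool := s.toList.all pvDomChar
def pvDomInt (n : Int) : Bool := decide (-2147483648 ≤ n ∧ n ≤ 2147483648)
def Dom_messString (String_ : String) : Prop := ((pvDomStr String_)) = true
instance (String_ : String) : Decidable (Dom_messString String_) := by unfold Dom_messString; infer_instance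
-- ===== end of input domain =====

-- B: re.sub over [pPiImM] with a callback appending '1', instead of A's char-by-char accumulator loop (idiomatic).


-- ===== PORT A =====
-- Port of A: fold over the characters accumulating newStr.
def messString (String_ : String) : String :=
  String_.toList.foldl (fun newStr i =>
    if i ∈ "pPiImM".toList then newStr ++ String.ofList [i] ++ "1"
    else newStr ++ String.ofList [i]) ""

-- ===== PORT B =====
-- Port of B: re.sub over the class [pPiImM] with callback appending '1'
-- = each matching char is replaced by itself followed by '1': one flatMap.
def messString_alt (String_ : String) : String :=
  String.ofList (String_.toList.flatMap fun c =>
    if c ∈ "pPiImM".toList then [c, '1'] else [c])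

-- ===== PRECONDITION & SPEC =====
def Spec_messString (String_ : String) (out : String) : Prop := out = messString_alt String_
instance (String_ : String) (out : String) : Decidable (Spec_messString String_ out) := by unfold Spec_messString; infer_instance

-- ===== CLAIM (what is proved, stated in full; the proofs are below) =====
def Claim_equal_messString : Prop := ∀ (String_ : String), Dom_messString String_ → Spec_messString String_ (messString String_)

-- ===== LEMMAS AND PROOFS =====

lemma messString_fold_acc (l : List Char) (acc : List Char) :
    l.foldl (fun newStr i =>
      if i ∈ "pPiImM".toList then newStr ++ String.ofList [i] ++ "1"
      else newStr ++ String.ofList [i]) (String.ofList acc)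
    = String.ofList (acc ++ l.flatMap fun c =>
        if c ∈ "pPiImM".toList then [c, '1'] else [c]) := by
  induction l generalizing acc with
  | nil => simp
  | cons c t ih =>
    simp only [List.foldl_cons, List.flatMap_cons]
    by_cases h : c ∈ "pPiImM".toList
    · rw [if_pos h]
      have : String.ofList acc ++ String.ofList [c] ++ "1" = String.ofList (acc ++ [c, '1']) := by
        apply String.toList_inj.mp; simp
      rw [this, ih, if_pos h]
      simp
    · rw [if_neg h]
      have : String.ofList acc ++ String.ofList [c] = String.ofList (acc ++ [c]) := by
        apply String.toList_inj.mp; simp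
      rw [this, ih, if_neg h]
      simp

-- ===== VERDICT (by name: the statement is the Claim_ definition above) =====
theorem messString_spec : Claim_equal_messString := by
  intro s _
  unfold Spec_messString messString messString_alt
  have := messString_fold_acc s.toList []
  simpa using this
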